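-- pv_equiv track=rewrite | github.com/KaiyangQ/mpac-protocol | mpac-package/src/mpac_protocol/core/scope.py | _symbol_matches
-- ===== SOURCE A (Python) =====
-- from typing import Any, Dict, List, Optional
--
-- def _symbol_matches(affects: List[str], used: List[str]) -> List[str]:
--     """Match the editor's ``affects_symbols`` against the importer's
--     scanner-computed ``impact_symbols``, returning the names that overlap.
--
--     Three layers of matching:
--
--     1. Exact intersection (``utils.foo`` vs ``utils.foo``).
--     2. FQN tail-tolerance: a bare name on one side matches the last segment
--        of an FQN on the other (``Note`` vs ``models.Note``). The scanner
--        always emits FQN form (``models.Note``), but agent declarations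
--        routinely use bare names — especially Claude when announcing
--        class-level edits. Without tail-tolerance, the bare-name case is
--        a silent miss.
--     3. Class-field owner tolerance: a class field declaration such as
--        ``Note.archived`` matches an importer using the class symbol
--        ``notes_app.models.Note``. The owner collapse only applies when the
--        owner segment looks like a class name, so lowercase module/function
--        pairs such as ``utils.foo`` vs ``utils.bar`` stay disjoint.
--
--     When both sides agree on the same tail but with different qualifications,
--     the longer (more qualified) form is reported, so callers rendering UI
--     show ``models.Note`` not ``Note``.
--     """
--     matches = set(affects) & set(used)
--
--     # Index by tail so we can find cross-form matches (bare ↔ FQN).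
--     affects_by_tail: Dict[str, str] = {}
--     for s in affects:
--         affects_by_tail[s.rsplit(".", 1)[-1]] = s
--     used_by_tail: Dict[str, str] = {}
--     for s in used:
--         used_by_tail[s.rsplit(".", 1)[-1]] = s
--
--     for tail in set(affects_by_tail) & set(used_by_tail):
--         a = affects_by_tail[tail]
--         u = used_by_tail[tail]
--         if a == u:
--             continue  # already in matches via exact path
--         # Prefer the more qualified (longer) form for display.
--         matches.add(a if len(a) >= len(u) else u)
--
--     def class_owner(symbol: str) -> Optional[str]:
--         parts = symbol.split(".")
--         if len(parts) < 2:
--             return None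
--         owner = parts[-2]
--         if not owner or not owner[0].isupper():
--             return None
--         return ".".join(parts[:-1])
--
--     def same_symbol_or_tail(left: str, right: str) -> bool:
--         return left == right or left.rsplit(".", 1)[-1] == right.rsplit(".", 1)[-1]
--
--     for a in affects:
--         a_owner = class_owner(a)
--         for u in used:
--             u_owner = class_owner(u)
--             if a_owner and same_symbol_or_tail(a_owner, u):
--                 matches.add(a)
--             if u_owner and same_symbol_or_tail(a, u_owner):
--                 matches.add(u)
--             if a_owner and u_owner and same_symbol_or_tail(a_owner, u_owner):
--                 matches.add(a if len(a) >= len(u) else u)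
--
--     return sorted(matches)
-- ===== SOURCE B (Python) =====
-- from typing import List, Optional
--
--
-- def _symbol_matches(affects: List[str], used: List[str]) -> List[str]:
--     """Single-pass indexed matching: group both sides by tail / owner-tail
--     once and track per-group minimum lengths, instead of the all-pairs scan."""
--
--     def tail(s: str) -> str:
--         return s.rsplit(".", 1)[-1]
--
--     def class_owner(symbol: str) -> Optional[str]:
--         parts = symbol.split(".")
--         if len(parts) < 2:
--             return None
--         owner = parts[-2]
--         if not owner or not owner[0].isupper():
--             return None
--         return ".".join(parts[:-1])
--
--     def owner_tail(s: str) -> Optional[str]: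
--         # the tail of the class owner, when there is one: the grouping key
--         o = class_owner(s)
--         return tail(o) if o is not None else None
--
--     used_set = set(used)
--     matches = {a for a in affects if a in used_set}
--
--     # tail-tolerant layer: last symbol per tail on each side
--     a_by_tail = {tail(s): s for s in affects}
--     u_by_tail = {tail(s): s for s in used}
--     for t, a in a_by_tail.items():
--         u = u_by_tail.get(t)
--         if u is not None and u != a:
--             matches.add(a if len(a) >= len(u) else u)
--
--     used_tails = {tail(s) for s in used}
--     affect_tails = {tail(s) for s in affects}
--
--     # per owner-tail group: the minimum symbol length on each side
--     a_min = {}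
--     for a in affects:
--         ot = owner_tail(a)
--         if ot is not None and (ot not in a_min or len(a) < a_min[ot]):
--             a_min[ot] = len(a)
--     u_min = {}
--     for u in used:
--         ot = owner_tail(u)
--         if ot is not None and (ot not in u_min or len(u) < u_min[ot]):
--             u_min[ot] = len(u)
--
--     for a in affects:
--         ot = owner_tail(a)
--         if ot is None:
--             continue
--         if ot in used_tails:
--             matches.add(a)  # owner of a names some used symbol's tail
--         if ot in u_min and u_min[ot] <= len(a):
--             matches.add(a)  # a is the preferred side of some owner/owner pair
--     for u in used:
--         ot = owner_tail(u)
--         if ot is None: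
--             continue
--         if ot in affect_tails:
--             matches.add(u)
--         if ot in a_min and a_min[ot] < len(u):
--             matches.add(u)
--
--     return sorted(matches)
-- ===== Notes on version B (the rewrite author's own statement) =====
-- stated objective: faster
-- what changed: Replaces the all-pairs affects x used loop with one-pass indexes: a set of tails per side and a per-owner-tail minimum-length dict, so each symbol is classified by O(1) lookups instead of scanning the other list.
import Mathlib
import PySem

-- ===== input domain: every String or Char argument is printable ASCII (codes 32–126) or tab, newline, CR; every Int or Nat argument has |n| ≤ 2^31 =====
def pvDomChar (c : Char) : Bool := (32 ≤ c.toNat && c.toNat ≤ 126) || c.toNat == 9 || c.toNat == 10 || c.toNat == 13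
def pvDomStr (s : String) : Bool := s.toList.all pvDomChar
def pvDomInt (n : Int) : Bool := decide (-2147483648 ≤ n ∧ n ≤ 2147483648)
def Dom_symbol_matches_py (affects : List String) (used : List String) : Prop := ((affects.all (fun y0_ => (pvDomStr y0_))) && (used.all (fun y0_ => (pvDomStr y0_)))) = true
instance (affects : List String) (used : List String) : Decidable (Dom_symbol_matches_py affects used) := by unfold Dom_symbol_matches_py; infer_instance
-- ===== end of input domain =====

-- B replaces A's all-pairs affects × used scan with one-pass indexes (tail sets and
-- per-owner-tail minimum-length dicts), an asymptotically faster exact re-implementation.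

-- ===== PORT A =====
-- hand port of s.rsplit(".", 1)[-1] (exact: the segment after the last '.', or all of s)
def pyTail (s : String) : String :=
  String.ofList ((s.toList.reverse.takeWhile (fun c => c ≠ '.')).reverse)

-- symbol.split("."); PySem.Str.split? is always `some` here because the separator "." is nonempty
def pySplitDot (s : String) : List String :=
  (PySem.Str.split? s ".").getD [s]

-- port of the nested helper class_owner (B reuses it inside its owner_tail helper)
def pyClassOwner (symbol : String) : Option String :=
  let parts := pySplitDot symbol
  if parts.length < 2 then none
  else
    match PySem.List.pyGet? parts (-2) with   -- parts[-2]; present since 2 ≤ len(parts)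
    | none => none
    | some owner =>
      match owner.toList with
      | [] => none                             -- "if not owner"
      | c :: _ =>
        if PySem.Chars.isupper c then some (PySem.Str.join "." parts.dropLast) else none

-- port of the nested helper same_symbol_or_tail
def pySameSymbolOrTail (l r : String) : Bool :=
  l == r || pyTail l == pyTail r

-- "a if len(a) >= len(u) else u"
def pyPrefer (a u : String) : String :=
  if PySem.Str.len u ≤ PySem.Str.len a then a else u

def symbol_matches_py (affects : List String) (used : List String) : List String :=
  let matches0 : PySem.Set String :=
    PySem.Set.inter (PySem.Set.ofList affects) (PySem.Set.ofList used)
  let aByTail : PySem.Dict String String :=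
    affects.foldl (fun d s => d.insert (pyTail s) s) PySem.Dict.empty
  let uByTail : PySem.Dict String String :=
    used.foldl (fun d s => d.insert (pyTail s) s) PySem.Dict.empty
  let commonTails := PySem.Set.inter (PySem.Set.ofList aByTail.keys) (PySem.Set.ofList uByTail.keys)
  let matches1 := commonTails.foldl (fun m t =>
      let a := aByTail.getD t ""   -- plain [t] lookup: t is a key of both dicts
      let u := uByTail.getD t ""
      if a == u then m else PySem.Set.add m (pyPrefer a u)) matches0
  let matches2 := affects.foldl (fun m a =>
      let aOwner := pyClassOwner a
      used.foldl (fun m u =>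
        let uOwner := pyClassOwner u
        let m := match aOwner with
          | some ao => if pySameSymbolOrTail ao u then PySem.Set.add m a else m
          | none => m
        let m := match uOwner with
          | some uo => if pySameSymbolOrTail a uo then PySem.Set.add m u else m
          | none => m
        match aOwner, uOwner with
        | some ao, some uo =>
            if pySameSymbolOrTail ao uo then PySem.Set.add m (pyPrefer a u) else m
        | _, _ => m) m) matches1
  PySem.List.sorted matches2 (fun x => x) false

-- ===== PORT B =====
-- B's owner_tail helper: the tail of class_owner, used as the grouping key
def pyOwnerTail (s : String) : Option String :=
  match pyClassOwner s with
  | some o => some (pyTail o)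
  | none => none

def symbol_matches_py_alt (affects : List String) (used : List String) : List String :=
  let usedSet := PySem.Set.ofList used
  let matches0 : PySem.Set String := PySem.Set.ofList (affects.filter (fun a => usedSet.contains a))
  let aByTail : PySem.Dict String String :=
    affects.foldl (fun d s => d.insert (pyTail s) s) PySem.Dict.empty
  let uByTail : PySem.Dict String String :=
    used.foldl (fun d s => d.insert (pyTail s) s) PySem.Dict.empty
  let matches1 := aByTail.items.foldl (fun m p =>
      match uByTail.get? p.1 with
      | some u => if u ≠ p.2 then PySem.Set.add m (pyPrefer p.2 u) else m
      | none => m) matches0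
  let usedTails := PySem.Set.ofList (used.map pyTail)
  let affectTails := PySem.Set.ofList (affects.map pyTail)
  let aMin : PySem.Dict String Int := affects.foldl (fun d a =>
      match pyOwnerTail a with
      | some ot =>
          match d.get? ot with
          | some mn => if PySem.Str.len a < mn then d.insert ot (PySem.Str.len a) else d
          | none => d.insert ot (PySem.Str.len a)
      | none => d) PySem.Dict.empty
  let uMin : PySem.Dict String Int := used.foldl (fun d u =>
      match pyOwnerTail u with
      | some ot =>
          match d.get? ot with
          | some mn => if PySem.Str.len u < mn then d.insert ot (PySem.Str.len u) else d
          | none => d.insert ot (PySem.Str.len u)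
      | none => d) PySem.Dict.empty
  let matches2 := affects.foldl (fun m a =>
      match pyOwnerTail a with
      | none => m
      | some ot =>
        let m := if usedTails.contains ot then PySem.Set.add m a else m
        match uMin.get? ot with
        | some mn => if mn ≤ PySem.Str.len a then PySem.Set.add m a else m
        | none => m) matches1
  let matches3 := used.foldl (fun m u =>
      match pyOwnerTail u with
      | none => m
      | some ot =>
        let m := if affectTails.contains ot then PySem.Set.add m u else m
        match aMin.get? ot with
        | some mn => if mn < PySem.Str.len u then PySem.Set.add m u else m
        | none => m) matches2
  PySem.List.sorted matches3 (fun x => x) false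

-- ===== PRECONDITION & SPEC =====
def Spec_symbol_matches_py (affects : List String) (used : List String) (out : List String) : Prop := out = symbol_matches_py_alt affects used
instance (affects : List String) (used : List String) (out : List String) : Decidable (Spec_symbol_matches_py affects used out) := by unfold Spec_symbol_matches_py; infer_instance

-- ===== CLAIM (what is proved, stated in full; the proofs are below) =====
def Claim_equal_symbol_matches_py : Prop := ∀ (affects : List String) (used : List String), Dom_symbol_matches_py affects used → Spec_symbol_matches_py affects used (symbol_matches_py affects used)

-- ===== LEMMAS AND PROOFS =====

-- proof-side names for the ports' building blocks (definitionally equal to the inline code)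

def pvTailDict (l : List String) : PySem.Dict String String :=
  l.foldl (fun d s => d.insert (pyTail s) s) PySem.Dict.empty

def pvMinStep (d : PySem.Dict String Int) (a : String) : PySem.Dict String Int :=
  match pyOwnerTail a with
  | some ot =>
      match d.get? ot with
      | some mn => if PySem.Str.len a < mn then d.insert ot (PySem.Str.len a) else d
      | none => d.insert ot (PySem.Str.len a)
  | none => d

def pvMinDict (l : List String) : PySem.Dict String Int :=
  l.foldl pvMinStep PySem.Dict.empty

def pvAInner (a : String) : PySem.Set String → String → PySem.Set String := fun m u =>
  let uOwner := pyClassOwner u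
  let m := match pyClassOwner a with
    | some ao => if pySameSymbolOrTail ao u then PySem.Set.add m a else m
    | none => m
  let m := match uOwner with
    | some uo => if pySameSymbolOrTail a uo then PySem.Set.add m u else m
    | none => m
  match pyClassOwner a, uOwner with
  | some ao, some uo =>
      if pySameSymbolOrTail ao uo then PySem.Set.add m (pyPrefer a u) else m
  | _, _ => m

def pvASet (affects used : List String) : PySem.Set String :=
  let matches0 := PySem.Set.inter (PySem.Set.ofList affects) (PySem.Set.ofList used)
  let aByTail := pvTailDict affects
  let uByTail := pvTailDict used
  let commonTails := PySem.Set.inter (PySem.Set.ofList aByTail.keys) (PySem.Set.ofList uByTail.keys)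
  let matches1 := commonTails.foldl (fun m t =>
      let a := aByTail.getD t ""
      let u := uByTail.getD t ""
      if a == u then m else PySem.Set.add m (pyPrefer a u)) matches0
  affects.foldl (fun m a => used.foldl (pvAInner a) m) matches1

def pvBSet (affects used : List String) : PySem.Set String :=
  let usedSet := PySem.Set.ofList used
  let matches0 := PySem.Set.ofList (affects.filter (fun a => usedSet.contains a))
  let aByTail := pvTailDict affects
  let uByTail := pvTailDict used
  let matches1 := aByTail.items.foldl (fun m p =>
      match uByTail.get? p.1 with
      | some u => if u ≠ p.2 then PySem.Set.add m (pyPrefer p.2 u) else m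
      | none => m) matches0
  let usedTails := PySem.Set.ofList (used.map pyTail)
  let affectTails := PySem.Set.ofList (affects.map pyTail)
  let aMin := pvMinDict affects
  let uMin := pvMinDict used
  let matches2 := affects.foldl (fun m a =>
      match pyOwnerTail a with
      | none => m
      | some ot =>
        let m := if usedTails.contains ot then PySem.Set.add m a else m
        match uMin.get? ot with
        | some mn => if mn ≤ PySem.Str.len a then PySem.Set.add m a else m
        | none => m) matches1
  used.foldl (fun m u =>
      match pyOwnerTail u with
      | none => m
      | some ot =>
        let m := if affectTails.contains ot then PySem.Set.add m u else m
        match aMin.get? ot with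
        | some mn => if mn < PySem.Str.len u then PySem.Set.add m u else m
        | none => m) matches2

theorem pvA_eq_sorted (affects used : List String) :
    symbol_matches_py affects used = PySem.List.sorted (pvASet affects used) (fun x => x) false := rfl

theorem pvB_eq_sorted (affects used : List String) :
    symbol_matches_py_alt affects used = PySem.List.sorted (pvBSet affects used) (fun x => x) false := rfl

-- generic: membership through a fold of conditional Set.adds
theorem pv_mem_foldl_step {β : Type} (f : PySem.Set String → β → PySem.Set String)
    (Q : β → String → Prop)
    (hf : ∀ s b x, x ∈ f s b ↔ x ∈ s ∨ Q b x) :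
    ∀ (l : List β) (s0 : PySem.Set String) (x : String),
      x ∈ l.foldl f s0 ↔ x ∈ s0 ∨ ∃ b ∈ l, Q b x := by
  intro l
  induction l with
  | nil => simp
  | cons b l ih =>
    intro s0 x
    simp only [List.foldl_cons, ih, hf, List.mem_cons]
    constructor
    · rintro ((h | h) | ⟨c, hc, hq⟩)
      · exact Or.inl h
      · exact Or.inr ⟨b, Or.inl rfl, h⟩
      · exact Or.inr ⟨c, Or.inr hc, hq⟩
    · rintro (h | ⟨c, (rfl | hc), hq⟩)
      · exact Or.inl (Or.inl h)
      · exact Or.inl (Or.inr hq)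
      · exact Or.inr ⟨c, hc, hq⟩

-- generic: nodup through a fold whose step preserves nodup
theorem pv_nodup_foldl {β : Type} (f : PySem.Set String → β → PySem.Set String)
    (hf : ∀ s b, List.Nodup s → List.Nodup (f s b)) :
    ∀ (l : List β) (s0 : PySem.Set String), List.Nodup s0 → List.Nodup (l.foldl f s0) := by
  intro l
  induction l with
  | nil => intro s0 h; exact h
  | cons b l ih => intro s0 h; exact ih _ (hf _ _ h)

theorem pv_mem_addIf (c : Bool) (s : PySem.Set String) (x y : String) :
    x ∈ (if c then PySem.Set.add s y else s) ↔ x ∈ s ∨ (c = true ∧ x = y) := by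
  cases c <;> simp [PySem.Set.mem_add]

-- same_symbol_or_tail collapses to tail equality (equal strings have equal tails)
theorem pySameSymbolOrTail_iff (l r : String) :
    pySameSymbolOrTail l r = true ↔ pyTail l = pyTail r := by
  unfold pySameSymbolOrTail
  constructor
  · intro h
    rcases Bool.or_eq_true_iff.mp h with h | h
    · rw [eq_of_beq h]
    · exact eq_of_beq h
  · intro h
    exact Bool.or_eq_true_iff.mpr (Or.inr (beq_iff_eq.mpr h))

-- what one iteration of A's inner loop contributes
def pvQI (a u x : String) : Prop :=
  (pyOwnerTail a = some (pyTail u) ∧ x = a)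
  ∨ (some (pyTail a) = pyOwnerTail u ∧ x = u)
  ∨ (∃ t, pyOwnerTail u = some t ∧ pyOwnerTail a = some t ∧ x = pyPrefer a u)

set_option maxHeartbeats 1000000 in
theorem pv_AInner_mem (a u : String) (m : PySem.Set String) (x : String) :
    x ∈ pvAInner a m u ↔ x ∈ m ∨ pvQI a u x := by
  unfold pvAInner pvQI
  cases hA : pyClassOwner a <;> cases hU : pyClassOwner u
  case none.none =>
    simp [pyOwnerTail, hA, hU]
  case none.some uo =>
    dsimp only
    rw [pv_mem_addIf]
    simp [pyOwnerTail, hA, hU, pySameSymbolOrTail_iff]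
  case some.none ao =>
    dsimp only
    rw [pv_mem_addIf]
    simp [pyOwnerTail, hA, hU, pySameSymbolOrTail_iff]
  case some.some ao uo =>
    dsimp only
    rw [pv_mem_addIf, pv_mem_addIf, pv_mem_addIf]
    simp [pyOwnerTail, hA, hU, pySameSymbolOrTail_iff]
    tauto

theorem pv_minStep_spec (R : Int → Prop) (hR : ∀ i j : Int, i ≤ j → R j → R i)
    (d : PySem.Dict String Int) (u t : String) :
    (∃ mn, (pvMinStep d u).get? t = some mn ∧ R mn) ↔
      (∃ mn, d.get? t = some mn ∧ R mn) ∨ (pyOwnerTail u = some t ∧ R (PySem.Str.len u)) := by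
  unfold pvMinStep
  cases hA : pyOwnerTail u with
  | none => simp
  | some ot =>
    by_cases ht : t = ot
    · subst ht
      cases hd : d.get? t with
      | none => dsimp only; rw [hd]; simp
      | some mn =>
        dsimp only; rw [hd]; dsimp only
        split_ifs with h
        · simp
          exact fun hr => hR _ _ (le_of_lt h) hr
        · simp [hd]
          exact fun hr => hR _ _ (not_lt.mp h) hr
    · have hne : some ot ≠ some t := by simpa using fun h => ht h.symm
      cases hd : d.get? ot with
      | none => dsimp only; rw [hd]; simp [PySem.Dict.get?_insert, ht, hne]
      | some mn => dsimp only; rw [hd]; dsimp only; split_ifs <;> simp [PySem.Dict.get?_insert, ht, hne]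

theorem pv_minDict_spec_gen (R : Int → Prop) (hR : ∀ i j : Int, i ≤ j → R j → R i)
    (l : List String) (t : String) :
    ∀ d : PySem.Dict String Int,
    (∃ mn, (l.foldl pvMinStep d).get? t = some mn ∧ R mn) ↔
      (∃ mn, d.get? t = some mn ∧ R mn) ∨ ∃ u ∈ l, pyOwnerTail u = some t ∧ R (PySem.Str.len u) := by
  induction l with
  | nil => simp
  | cons u l ih =>
    intro d
    simp only [List.foldl_cons, ih, pv_minStep_spec R hR d u t, List.mem_cons]
    constructor
    · rintro ((h | h) | ⟨v, hv, hq⟩)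
      · exact Or.inl h
      · exact Or.inr ⟨u, Or.inl rfl, h⟩
      · exact Or.inr ⟨v, Or.inr hv, hq⟩
    · rintro (h | ⟨v, (rfl | hv), hq⟩)
      · exact Or.inl (Or.inl h)
      · exact Or.inl (Or.inr hq)
      · exact Or.inr ⟨v, hv, hq⟩

theorem pv_minDict_le (l : List String) (t : String) (L : Int) :
    (∃ mn, (pvMinDict l).get? t = some mn ∧ mn ≤ L) ↔
      ∃ u ∈ l, pyOwnerTail u = some t ∧ PySem.Str.len u ≤ L := by
  have := pv_minDict_spec_gen (· ≤ L) (fun i j hij hj => le_trans hij hj) l t PySem.Dict.empty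
  simpa [PySem.Dict.get?_empty] using this

theorem pv_minDict_lt (l : List String) (t : String) (L : Int) :
    (∃ mn, (pvMinDict l).get? t = some mn ∧ mn < L) ↔
      ∃ u ∈ l, pyOwnerTail u = some t ∧ PySem.Str.len u < L := by
  have := pv_minDict_spec_gen (· < L) (fun i j hij hj => lt_of_le_of_lt hij hj) l t PySem.Dict.empty
  simpa [PySem.Dict.get?_empty] using this

theorem pv_nodup_keys_tailDict (l : List String) : (pvTailDict l).keys.Nodup := by
  apply PySem.Dict.nodup_keys_foldl_insert_key l pyTail (fun _ s => s)
  simp [PySem.Dict.empty, PySem.Dict.keys]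

theorem pv_mem_keys_iff (d : PySem.Dict String String) (t : String) :
    t ∈ d.keys ↔ ∃ v, d.get? t = some v := by
  rw [← not_iff_not]
  push Not
  simp [← PySem.Dict.get?_eq_none_iff_not_mem_keys, Option.eq_none_iff_forall_ne_some]

-- bridge between A's common-tail iteration and B's items iteration
theorem pv_tail_layer_iff (affects used : List String) (x : String) :
    (∃ t, (t ∈ (pvTailDict affects).keys ∧ t ∈ (pvTailDict used).keys) ∧
        ¬ ((pvTailDict affects).getD t "" = (pvTailDict used).getD t "") ∧
        x = pyPrefer ((pvTailDict affects).getD t "") ((pvTailDict used).getD t "")) ↔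
    (∃ p ∈ (pvTailDict affects).items, ∃ u, (pvTailDict used).get? p.1 = some u ∧
        ¬ (u = p.2) ∧ x = pyPrefer p.2 u) := by
  constructor
  · rintro ⟨t, ⟨htA, htU⟩, hne, hx⟩
    obtain ⟨a, ha⟩ := (pv_mem_keys_iff _ t).mp htA
    obtain ⟨u, hu⟩ := (pv_mem_keys_iff _ t).mp htU
    refine ⟨(t, a), ((PySem.Dict.get?_eq_some_iff_mem_items _ _ _ (pv_nodup_keys_tailDict affects)).mp ha), u, hu, ?_, ?_⟩
    · rw [PySem.Dict.getD_of_get?_eq_some _ "" ha, PySem.Dict.getD_of_get?_eq_some _ "" hu] at hne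
      exact fun h => hne h.symm
    · rwa [PySem.Dict.getD_of_get?_eq_some _ "" ha, PySem.Dict.getD_of_get?_eq_some _ "" hu] at hx
  · rintro ⟨⟨t, a⟩, hp, u, hu, hne, hx⟩
    have ha : (pvTailDict affects).get? t = some a :=
      (PySem.Dict.get?_eq_some_iff_mem_items _ _ _ (pv_nodup_keys_tailDict affects)).mpr hp
    refine ⟨t, ⟨(pv_mem_keys_iff _ t).mpr ⟨a, ha⟩, (pv_mem_keys_iff _ t).mpr ⟨u, hu⟩⟩, ?_, ?_⟩
    · rw [PySem.Dict.getD_of_get?_eq_some _ "" ha, PySem.Dict.getD_of_get?_eq_some _ "" hu]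
      exact fun h => hne h.symm
    · rwa [PySem.Dict.getD_of_get?_eq_some _ "" ha, PySem.Dict.getD_of_get?_eq_some _ "" hu]

theorem pv_mem_ASet (affects used : List String) (x : String) :
    x ∈ pvASet affects used ↔
      ((x ∈ affects ∧ x ∈ used)
        ∨ (∃ t, (t ∈ (pvTailDict affects).keys ∧ t ∈ (pvTailDict used).keys) ∧
            ¬ ((pvTailDict affects).getD t "" = (pvTailDict used).getD t "") ∧
            x = pyPrefer ((pvTailDict affects).getD t "") ((pvTailDict used).getD t ""))
        ∨ (∃ a ∈ affects, ∃ u ∈ used, pvQI a u x)) := by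
  unfold pvASet
  rw [pv_mem_foldl_step _ (fun a x => ∃ u ∈ used, pvQI a u x)
        (fun m a x => pv_mem_foldl_step (pvAInner a) (pvQI a)
          (fun m' u x' => pv_AInner_mem a u m' x') used m x),
      pv_mem_foldl_step _
        (fun t x => ¬ ((pvTailDict affects).getD t "" = (pvTailDict used).getD t "") ∧
            x = pyPrefer ((pvTailDict affects).getD t "") ((pvTailDict used).getD t ""))
        (fun m t x => by
          dsimp only
          split_ifs with h
          · simp only [beq_iff_eq] at h
            simp [h]
          · simp only [beq_iff_eq] at h
            simp [PySem.Set.mem_add, h])]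
  simp only [PySem.Set.mem_inter, PySem.Set.mem_ofList, or_assoc]

theorem pv_mem_BSet (affects used : List String) (x : String) :
    x ∈ pvBSet affects used ↔
      ((x ∈ affects ∧ x ∈ used)
        ∨ (∃ p ∈ (pvTailDict affects).items, ∃ u, (pvTailDict used).get? p.1 = some u ∧
            ¬ (u = p.2) ∧ x = pyPrefer p.2 u)
        ∨ (∃ a ∈ affects, ∃ t, pyOwnerTail a = some t ∧
            (((PySem.Set.ofList (used.map pyTail)).contains t = true)
              ∨ (∃ mn, (pvMinDict used).get? t = some mn ∧ mn ≤ PySem.Str.len a)) ∧ x = a)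
        ∨ (∃ u ∈ used, ∃ t, pyOwnerTail u = some t ∧
            (((PySem.Set.ofList (affects.map pyTail)).contains t = true)
              ∨ (∃ mn, (pvMinDict affects).get? t = some mn ∧ mn < PySem.Str.len u)) ∧ x = u)) := by
  unfold pvBSet
  rw [pv_mem_foldl_step _
        (fun u x => ∃ t, pyOwnerTail u = some t ∧
            (((PySem.Set.ofList (affects.map pyTail)).contains t = true)
              ∨ (∃ mn, (pvMinDict affects).get? t = some mn ∧ mn < PySem.Str.len u)) ∧ x = u)
        (fun m u x => by
          cases hU : pyOwnerTail u with
          | none => dsimp only; simp [hU]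
          | some ot =>
            dsimp only
            cases hm : (pvMinDict affects).get? ot <;> dsimp only <;>
              split_ifs <;>
              simp_all [PySem.Set.mem_add]),
      pv_mem_foldl_step _
        (fun a x => ∃ t, pyOwnerTail a = some t ∧
            (((PySem.Set.ofList (used.map pyTail)).contains t = true)
              ∨ (∃ mn, (pvMinDict used).get? t = some mn ∧ mn ≤ PySem.Str.len a)) ∧ x = a)
        (fun m a x => by
          cases hA : pyOwnerTail a with
          | none => dsimp only; simp [hA]
          | some ot =>
            dsimp only
            cases hm : (pvMinDict used).get? ot <;> dsimp only <;>
              split_ifs <;>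
              simp_all [PySem.Set.mem_add]),
      pv_mem_foldl_step _
        (fun p x => ∃ u, (pvTailDict used).get? p.1 = some u ∧
            ¬ (u = p.2) ∧ x = pyPrefer p.2 u)
        (fun m p x => by
          cases hu : (pvTailDict used).get? p.1 <;> dsimp only
          · simp [hu]
          · rename_i u
            split_ifs with h <;>
              simp_all [PySem.Set.mem_add])]
  simp only [PySem.Set.mem_ofList, List.mem_filter, PySem.Set.contains_iff, or_assoc]

theorem pv_prefer_split (a u x : String) :
    x = pyPrefer a u ↔
      (PySem.Str.len u ≤ PySem.Str.len a ∧ x = a) ∨ (PySem.Str.len a < PySem.Str.len u ∧ x = u) := by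
  unfold pyPrefer
  by_cases h : PySem.Str.len u ≤ PySem.Str.len a
  · rw [if_pos h]
    constructor
    · intro hx
      exact Or.inl ⟨h, hx⟩
    · rintro (⟨_, hx⟩ | ⟨hlt, hx⟩)
      · exact hx
      · exact absurd hlt (not_lt.mpr h)
  · rw [if_neg h]
    constructor
    · intro hx
      exact Or.inr ⟨not_le.mp h, hx⟩
    · rintro (⟨hle, hx⟩ | ⟨_, hx⟩)
      · exact absurd hle h
      · exact hx

-- A's owner layer (pairwise) equals B's indexed owner layer
theorem pv_owner_layer (affects used : List String) (x : String) :
    (∃ a ∈ affects, ∃ u ∈ used, pvQI a u x) ↔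
      ((∃ a ∈ affects, ∃ t, pyOwnerTail a = some t ∧
          (((PySem.Set.ofList (used.map pyTail)).contains t = true)
            ∨ (∃ mn, (pvMinDict used).get? t = some mn ∧ mn ≤ PySem.Str.len a)) ∧ x = a)
        ∨ (∃ u ∈ used, ∃ t, pyOwnerTail u = some t ∧
          (((PySem.Set.ofList (affects.map pyTail)).contains t = true)
            ∨ (∃ mn, (pvMinDict affects).get? t = some mn ∧ mn < PySem.Str.len u)) ∧ x = u)) := by
  simp only [pv_minDict_le, pv_minDict_lt, PySem.Set.contains_iff, PySem.Set.mem_ofList,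
    List.mem_map]
  constructor
  · rintro ⟨a, ha, u, hu, hQI⟩
    rcases hQI with ⟨how, hx⟩ | ⟨how, hx⟩ | ⟨t, howU, howA, hx⟩
    · exact Or.inl ⟨a, ha, pyTail u, how, Or.inl ⟨u, hu, rfl⟩, hx⟩
    · exact Or.inr ⟨u, hu, pyTail a, how.symm, Or.inl ⟨a, ha, rfl⟩, hx⟩
    · rcases (pv_prefer_split a u x).mp hx with ⟨hlen, hx⟩ | ⟨hlen, hx⟩
      · exact Or.inl ⟨a, ha, t, howA, Or.inr ⟨u, hu, howU, hlen⟩, hx⟩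
      · exact Or.inr ⟨u, hu, t, howU, Or.inr ⟨a, ha, howA, hlen⟩, hx⟩
  · rintro (⟨a, ha, t, how, hcond, hx⟩ | ⟨u, hu, t, how, hcond, hx⟩)
    · rcases hcond with ⟨u, hu, htail⟩ | ⟨u, hu, howU, hlen⟩
      · exact ⟨a, ha, u, hu, Or.inl ⟨htail ▸ how, hx⟩⟩
      · exact ⟨a, ha, u, hu, Or.inr (Or.inr ⟨t, howU, how,
          (pv_prefer_split a u x).mpr (Or.inl ⟨hlen, hx⟩)⟩)⟩
    · rcases hcond with ⟨a, ha, htail⟩ | ⟨a, ha, howA, hlen⟩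
      · exact ⟨a, ha, u, hu, Or.inr (Or.inl ⟨htail ▸ how.symm, hx⟩)⟩
      · exact ⟨a, ha, u, hu, Or.inr (Or.inr ⟨t, how, howA,
          (pv_prefer_split a u x).mpr (Or.inr ⟨hlen, hx⟩)⟩)⟩

theorem pv_sets_iff (affects used : List String) (x : String) :
    x ∈ pvASet affects used ↔ x ∈ pvBSet affects used := by
  simp only [pv_mem_ASet, pv_mem_BSet, pv_tail_layer_iff, pv_owner_layer]

theorem pv_nodup_ASet (affects used : List String) : List.Nodup (pvASet affects used) := by
  unfold pvASet
  refine pv_nodup_foldl _ (fun s a hs => pv_nodup_foldl (pvAInner a) ?_ used s hs) affects _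
      (pv_nodup_foldl _ ?_ _ _
        (PySem.Set.nodup_inter _ _ (PySem.Set.nodup_ofList _)))
  · intro s u hsu
    unfold pvAInner
    dsimp only
    cases pyClassOwner a <;> cases pyClassOwner u <;> dsimp only <;>
      first
        | assumption
        | (split_ifs <;> repeat first | assumption | apply PySem.Set.nodup_add)
  · intro s t hst
    dsimp only
    split_ifs
    · exact hst
    · exact PySem.Set.nodup_add _ _ hst

theorem pv_nodup_BSet (affects used : List String) : List.Nodup (pvBSet affects used) := by
  unfold pvBSet
  refine pv_nodup_foldl _ ?_ used _
      (pv_nodup_foldl _ ?_ affects _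
        (pv_nodup_foldl _ ?_ _ _ (PySem.Set.nodup_ofList _)))
  · intro s u hs
    dsimp only
    cases pyOwnerTail u <;> dsimp only
    · exact hs
    · cases (pvMinDict affects).get? _ <;> dsimp only <;>
        split_ifs <;>
        repeat first | assumption | apply PySem.Set.nodup_add
  · intro s a hs
    dsimp only
    cases pyOwnerTail a <;> dsimp only
    · exact hs
    · cases (pvMinDict used).get? _ <;> dsimp only <;>
        split_ifs <;>
        repeat first | assumption | apply PySem.Set.nodup_add
  · intro s p hs
    dsimp only
    cases (pvTailDict used).get? p.1 <;> dsimp only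
    · exact hs
    · split_ifs
      · exact PySem.Set.nodup_add _ _ hs
      · exact hs

-- ===== VERDICT (by name: the statement is the Claim_ definition above) =====
theorem symbol_matches_py_spec : Claim_equal_symbol_matches_py := by
  intro affects used _
  unfold Spec_symbol_matches_py
  rw [pvA_eq_sorted, pvB_eq_sorted]
  exact PySem.List.sorted_eq_sorted_of_perm _ _ _ (fun a b h => h)
    ((List.perm_ext_iff_of_nodup (pv_nodup_ASet affects used) (pv_nodup_BSet affects used)).mpr
      (pv_sets_iff affects used))
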